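-- pv_equiv track=rewrite | github.com/vcarl/sm-cli | compare_with_openapi.py | compare_endpoints
-- ===== SOURCE A (Python) =====
-- def compare_endpoints(client_usage, openapi_spec):
--     """Compare client endpoint usage against OpenAPI spec."""
--     client_endpoints = set(client_usage['endpoints'].keys())
--     spec_endpoints = set(openapi_spec.keys())
--
--     # Filter out dynamic/variable endpoints
--     client_static = {e for e in client_endpoints if not e.startswith('<')}
--
--     missing_from_spec = client_static - spec_endpoints
--     unused_in_client = spec_endpoints - client_static
--     matched = client_static & spec_endpoints
--
--     return {
--         'missing_from_spec': sorted(missing_from_spec),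
--         'unused_in_client': sorted(unused_in_client),
--         'matched': sorted(matched)
--     }
-- ===== SOURCE B (Python) =====
-- def compare_endpoints(client_usage, openapi_spec):
--     """Compare client endpoint usage against OpenAPI spec (sort-then-merge)."""
--     client = sorted({e for e in client_usage['endpoints'] if not e.startswith('<')})
--     spec = sorted(set(openapi_spec))
--     missing, unused, matched = [], [], []
--     i = j = 0
--     while i < len(client) and j < len(spec):
--         c, s = client[i], spec[j]
--         if c == s:
--             matched.append(c)
--             i += 1
--             j += 1
--         elif c < s:
--             missing.append(c)
--             i += 1
--         else:
--             unused.append(s)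
--             j += 1
--     missing += client[i:]
--     unused += spec[j:]
--     return {
--         'missing_from_spec': missing,
--         'unused_in_client': unused,
--         'matched': matched,
--     }
-- ===== Notes on version B (the rewrite author's own statement) =====
-- stated objective: alternative
-- what changed: Sorts the deduplicated static client endpoints and the spec keys first, then classifies missing/unused/matched in one two-pointer merge of the two sorted lists, instead of hash-set difference/intersection followed by three sorts.
import Mathlib
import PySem

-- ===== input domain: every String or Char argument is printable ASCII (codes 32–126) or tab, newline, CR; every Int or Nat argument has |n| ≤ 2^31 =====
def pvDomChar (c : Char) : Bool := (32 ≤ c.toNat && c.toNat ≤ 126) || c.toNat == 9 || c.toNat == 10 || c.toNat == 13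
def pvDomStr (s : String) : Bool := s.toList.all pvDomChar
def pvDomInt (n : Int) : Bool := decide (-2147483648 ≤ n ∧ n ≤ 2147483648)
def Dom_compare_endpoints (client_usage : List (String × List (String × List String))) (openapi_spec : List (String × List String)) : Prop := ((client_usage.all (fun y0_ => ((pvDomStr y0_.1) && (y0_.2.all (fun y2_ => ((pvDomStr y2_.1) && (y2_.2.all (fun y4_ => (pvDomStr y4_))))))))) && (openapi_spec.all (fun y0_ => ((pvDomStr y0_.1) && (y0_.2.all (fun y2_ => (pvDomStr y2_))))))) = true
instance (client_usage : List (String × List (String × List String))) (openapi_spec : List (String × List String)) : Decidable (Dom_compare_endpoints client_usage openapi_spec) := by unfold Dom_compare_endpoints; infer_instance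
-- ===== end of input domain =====

-- B sorts the deduplicated static client endpoints and the spec keys first and then
-- classifies missing/unused/matched in one two-pointer merge of the two sorted lists
-- (objective: alternative algorithm, same cost up to log factors).


-- ===== PORT A =====
def compare_endpoints (client_usage : List (String × List (String × List String))) (openapi_spec : List (String × List String)) : List (String × List String) :=
  match (PySem.Dict.ofList client_usage).get? "endpoints" with
  | none => []   -- KeyError: excluded by Pre_
  | some eps =>
    let client_endpoints : PySem.Set String := PySem.Set.ofList (PySem.Dict.keys (PySem.Dict.ofList eps))
    let spec_endpoints : PySem.Set String := PySem.Set.ofList (PySem.Dict.keys (PySem.Dict.ofList openapi_spec))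
    let client_static : PySem.Set String := client_endpoints.filter (fun e => !(PySem.Str.startswith e "<"))
    let missing_from_spec := PySem.Set.diff client_static spec_endpoints
    let unused_in_client := PySem.Set.diff spec_endpoints client_static
    let matched := PySem.Set.inter client_static spec_endpoints
    [("missing_from_spec", PySem.List.sorted missing_from_spec (fun x => x) false),
     ("unused_in_client", PySem.List.sorted unused_in_client (fun x => x) false),
     ("matched", PySem.List.sorted matched (fun x => x) false)]

-- ===== PORT B =====
-- Source B's while-loop: a two-pointer merge of the two sorted lists, consuming the lists
-- instead of indexing (the 'missing += client[i:]' / 'unused += spec[j:]' tails are the base cases)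
def pvMerge : List String → List String → List String × List String × List String
  | [], ys => ([], ys, [])
  | x :: xs, [] => (x :: xs, [], [])
  | x :: xs, y :: ys =>
    if x = y then
      let r := pvMerge xs ys
      (r.1, r.2.1, x :: r.2.2)
    else if x < y then
      let r := pvMerge xs (y :: ys)
      (x :: r.1, r.2.1, r.2.2)
    else
      let r := pvMerge (x :: xs) ys
      (r.1, y :: r.2.1, r.2.2)
termination_by xs ys => xs.length + ys.length

def compare_endpoints_alt (client_usage : List (String × List (String × List String))) (openapi_spec : List (String × List String)) : List (String × List String) :=
  match (PySem.Dict.ofList client_usage).get? "endpoints" with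
  | none => []   -- KeyError: excluded by Pre_
  | some eps =>
    let client := PySem.List.sorted (PySem.Set.ofList ((PySem.Dict.keys (PySem.Dict.ofList eps)).filter (fun e => !(PySem.Str.startswith e "<")))) (fun x => x) false
    let specl := PySem.List.sorted (PySem.Set.ofList (PySem.Dict.keys (PySem.Dict.ofList openapi_spec))) (fun x => x) false
    let r := pvMerge client specl
    [("missing_from_spec", r.1),
     ("unused_in_client", r.2.1),
     ("matched", r.2.2)]

-- ===== PRECONDITION & SPEC =====
-- A raises KeyError when client_usage lacks the 'endpoints' key (B raises there too); Pre_ excludes exactly those inputs.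
def Pre_compare_endpoints (client_usage : List (String × List (String × List String))) (openapi_spec : List (String × List String)) : Prop :=
  "endpoints" ∈ client_usage.map (·.1)
instance (client_usage : List (String × List (String × List String))) (openapi_spec : List (String × List String)) : Decidable (Pre_compare_endpoints client_usage openapi_spec) := by unfold Pre_compare_endpoints; infer_instance
def pvWitness_compare_endpoints : (List (String × List (String × List String))) × (List (String × List String)) :=
  ([("endpoints", [("/users", ["GET"])])], [("/users", ["GET"]), ("/posts", ["POST"])])

def Spec_compare_endpoints (client_usage : List (String × List (String × List String))) (openapi_spec : List (String × List String)) (out : List (String × List String)) : Prop := out = compare_endpoints_alt client_usage openapi_spec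
instance (client_usage : List (String × List (String × List String))) (openapi_spec : List (String × List String)) (out : List (String × List String)) : Decidable (Spec_compare_endpoints client_usage openapi_spec out) := by unfold Spec_compare_endpoints; infer_instance

-- ===== CLAIM (what is proved, stated in full; the proofs are below) =====
def Claim_equal_compare_endpoints : Prop := ∀ (client_usage : List (String × List (String × List String))) (openapi_spec : List (String × List String)), Dom_compare_endpoints client_usage openapi_spec → Pre_compare_endpoints client_usage openapi_spec → Spec_compare_endpoints client_usage openapi_spec (compare_endpoints client_usage openapi_spec)

-- ===== LEMMAS AND PROOFS =====

-- a key of the association list is a key of the dict built from it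
theorem pv_mem_keys_ofList {ν : Type} (ps : List (String × ν)) (k : String)
    (h : k ∈ ps.map (·.1)) : k ∈ (PySem.Dict.ofList ps).keys := by
  have he : PySem.Dict.ofList ps = List.foldl (fun d x => d.insert x.1 x.2) PySem.Dict.empty ps := rfl
  rw [he, PySem.Dict.keys_foldl_insert_key ps (·.1) (fun _ p => p.2) PySem.Dict.empty,
    PySem.Set.mem_update]
  exact Or.inr h

-- the merge of two strictly increasing lists is the three set-classification filters
theorem pvMerge_spec : ∀ (X Y : List String), X.Pairwise (· < ·) → Y.Pairwise (· < ·) →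
    pvMerge X Y = (X.filter (fun x => !(Y.contains x)),
                   Y.filter (fun y => !(X.contains y)),
                   X.filter (fun x => Y.contains x)) := by
  intro X Y hX hY
  induction X, Y using pvMerge.induct with
  | case1 ys => simp [pvMerge]
  | case2 x xs => simp [pvMerge]
  | case3 xs y ys ih =>
    have hx := List.pairwise_cons.mp hX
    have hy := List.pairwise_cons.mp hY
    simp only [pvMerge, ih hx.2 hy.2]
    simp [Prod.mk.injEq]
    refine ⟨?_, ?_, ?_⟩
    · apply List.filter_congr; intro z hz; simp [ne_of_gt (hx.1 z hz)]
    · apply List.filter_congr; intro z hz; simp [ne_of_gt (hy.1 z hz)]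
    · apply List.filter_congr; intro z hz; simp [ne_of_gt (hx.1 z hz)]
  | case4 x xs y ys hne hlt ih =>
    have hx := List.pairwise_cons.mp hX
    have hy := List.pairwise_cons.mp hY
    have hxny : ∀ z ∈ y :: ys, x ≠ z := by
      intro z hz
      rcases List.mem_cons.mp hz with h | h
      · exact h ▸ hne
      · exact ne_of_lt (lt_trans hlt (hy.1 z h))
    have hxnm : x ∉ ys := fun h => hxny x (List.mem_cons_of_mem _ h) rfl
    simp only [pvMerge, if_neg hne, if_pos hlt, ih hx.2 hY]
    simp [Prod.mk.injEq]
    refine ⟨?_, ?_, ?_⟩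
    · simp [hne, hxnm]
    · apply List.filter_congr; intro z hz
      simp [Ne.symm (hxny z hz)]
    · simp [hne, hxnm]
  | case5 x xs y ys hne hnlt ih =>
    have hx := List.pairwise_cons.mp hX
    have hy := List.pairwise_cons.mp hY
    have hylt : y < x := lt_of_le_of_ne (not_lt.mp hnlt) (Ne.symm hne)
    have hynx : ∀ z ∈ x :: xs, y ≠ z := by
      intro z hz
      rcases List.mem_cons.mp hz with h | h
      · exact h ▸ (ne_of_lt hylt)
      · exact ne_of_lt (lt_trans hylt (hx.1 z h))
    have hynm : y ∉ xs := fun h => hynx y (List.mem_cons_of_mem _ h) rfl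
    simp only [pvMerge, if_neg hne, if_neg hnlt, ih hX hy.2]
    simp [Prod.mk.injEq]
    refine ⟨?_, ?_, ?_⟩
    · apply List.filter_congr; intro z hz
      simp [Ne.symm (hynx z hz)]
    · simp [ne_of_lt hylt, hynm]
    · apply List.filter_congr; intro z hz
      simp [Ne.symm (hynx z hz)]

-- sorting a filtered set is filtering the sorted set
theorem pv_sorted_filter (l : List String) (p : String → Bool) (hnd : l.Nodup) :
    PySem.List.sorted (l.filter p) (fun x => x) false
      = (PySem.List.sorted l (fun x => x) false).filter p := by
  apply PySem.List.sorted_eq_of_perm_of_pairwise_lt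
  · exact (PySem.List.sorted_perm l (fun x => x) false).filter p
  · have hle : (PySem.List.sorted l (fun x => x) false).Pairwise (· ≤ ·) :=
      PySem.List.sorted_pairwise l (fun x => x)
    have hnd' : (PySem.List.sorted l (fun x => x) false).Nodup :=
      (PySem.List.sorted_perm l (fun x => x) false).nodup_iff.mpr hnd
    have hlt : (PySem.List.sorted l (fun x => x) false).Pairwise (· < ·) := by
      have := hle.and hnd'
      exact this.imp (fun h => lt_of_le_of_ne h.1 h.2)
    exact hlt.filter p

-- ===== VERDICT (by name: the statement is the Claim_ definition above) =====
theorem compare_endpoints_spec : Claim_equal_compare_endpoints := by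
  intro cu spec _ hpre
  unfold Spec_compare_endpoints
  unfold compare_endpoints compare_endpoints_alt
  cases hget : (PySem.Dict.ofList cu).get? "endpoints" with
  | none =>
    exact absurd (pv_mem_keys_ofList cu "endpoints" hpre)
      ((PySem.Dict.get?_eq_none_iff_not_mem_keys _ _).mp hget)
  | some eps =>
    simp only []
    set ke := PySem.Dict.keys (PySem.Dict.ofList eps) with hke
    set ss := PySem.Dict.keys (PySem.Dict.ofList spec) with hss
    have hkeN : ke.Nodup := PySem.Dict.nodup_keys_ofList eps
    have hssN : ss.Nodup := PySem.Dict.nodup_keys_ofList spec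
    have hcs : PySem.Set.ofList (ke.filter (fun e => !(PySem.Str.startswith e "<")))
        = ke.filter (fun e => !(PySem.Str.startswith e "<")) :=
      PySem.Set.ofList_eq_self_of_nodup _ (hkeN.filter _)
    have hssO : PySem.Set.ofList ss = ss := PySem.Set.ofList_eq_self_of_nodup _ hssN
    rw [PySem.Set.ofList_eq_self_of_nodup _ hkeN, hssO, hcs]
    set cs := ke.filter (fun e => !(PySem.Str.startswith e "<")) with hcsdef
    have hcsN : cs.Nodup := hkeN.filter _
    set C := PySem.List.sorted cs (fun x => x) false with hC
    set S := PySem.List.sorted ss (fun x => x) false with hS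
    have hCp : C.Pairwise (· < ·) := by
      have hle := PySem.List.sorted_pairwise cs (fun x => x)
      have hnd := (PySem.List.sorted_perm cs (fun x => x) false).nodup_iff.mpr hcsN
      exact (hle.and hnd).imp (fun h => lt_of_le_of_ne h.1 h.2)
    have hSp : S.Pairwise (· < ·) := by
      have hle := PySem.List.sorted_pairwise ss (fun x => x)
      have hnd := (PySem.List.sorted_perm ss (fun x => x) false).nodup_iff.mpr hssN
      exact (hle.and hnd).imp (fun h => lt_of_le_of_ne h.1 h.2)
    rw [pvMerge_spec C S hCp hSp]
    have hSmem : ∀ z, S.contains z = ss.contains z := by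
      intro z; simp [List.contains_eq_mem, hS, PySem.List.mem_sorted]
    have hCmem : ∀ z, C.contains z = cs.contains z := by
      intro z; simp [List.contains_eq_mem, hC, PySem.List.mem_sorted]
    have e1 : PySem.List.sorted (PySem.Set.diff cs ss) (fun x => x) false
        = C.filter (fun x => !(S.contains x)) := by
      have : PySem.Set.diff cs ss = cs.filter (fun x => !(ss.contains x)) := by
        simp [PySem.Set.diff, PySem.Set.contains]
      rw [this, pv_sorted_filter cs _ hcsN, ← hC]
      exact (List.filter_congr (fun z _ => by rw [hSmem z])).symm
    have e2 : PySem.List.sorted (PySem.Set.diff ss cs) (fun x => x) false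
        = S.filter (fun y => !(C.contains y)) := by
      have : PySem.Set.diff ss cs = ss.filter (fun x => !(cs.contains x)) := by
        simp [PySem.Set.diff, PySem.Set.contains]
      rw [this, pv_sorted_filter ss _ hssN, ← hS]
      exact (List.filter_congr (fun z _ => by rw [hCmem z])).symm
    have e3 : PySem.List.sorted (PySem.Set.inter cs ss) (fun x => x) false
        = C.filter (fun x => S.contains x) := by
      have : PySem.Set.inter cs ss = cs.filter (fun x => ss.contains x) := by
        simp [PySem.Set.inter, PySem.Set.contains]
      rw [this, pv_sorted_filter cs _ hcsN, ← hC]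
      exact (List.filter_congr (fun z _ => by rw [hSmem z])).symm
    rw [e1, e2, e3]
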